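-- pv_equiv track=rewrite | github.com/ElisaVoltolina/codice_tesi | penality_weights.py | create_penalty_weights_priority_groups
-- ===== SOURCE A (Python) =====
-- def create_penalty_weights_priority_groups(P, high_priority_nodes, medium_priority_nodes):
--     """Esempio 1: Gruppi di priorità
--     - high_priority_nodes: lista dei nodi ad alta priorità
--     - medium_priority_nodes: lista dei nodi a media priorità
--     - tutti gli altri: bassa priorità
--     """
--     penalty_weights = {}
--
--     for i in P:
--         if i in high_priority_nodes:
--             penalty_weights[i] = 10000  # Penalità molto alta = massima priorità
--         elif i in medium_priority_nodes:
--             penalty_weights[i] = 5000   # Penalità media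
--         else:
--             penalty_weights[i] = 1000   # Penalità bassa = minima priorità
--
--     return penalty_weights
-- ===== SOURCE B (Python) =====
-- def create_penalty_weights_priority_groups(P, high_priority_nodes, medium_priority_nodes):
--     penalty_weights = {i: 1000 for i in P}
--     Pset = set(P)
--     for m in medium_priority_nodes:
--         if m in Pset:
--             penalty_weights[m] = 5000
--     for h in high_priority_nodes:
--         if h in Pset:
--             penalty_weights[h] = 10000
--     return penalty_weights
-- ===== Notes on version B (the rewrite author's own statement) =====
-- stated objective: faster
-- what changed: Instead of scanning both priority lists for every node of P, B builds the low-priority dict in one comprehension and then overwrites weights by iterating the medium and then the high list once each, guarded by an O(1) set-membership test on P.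
import Mathlib
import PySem

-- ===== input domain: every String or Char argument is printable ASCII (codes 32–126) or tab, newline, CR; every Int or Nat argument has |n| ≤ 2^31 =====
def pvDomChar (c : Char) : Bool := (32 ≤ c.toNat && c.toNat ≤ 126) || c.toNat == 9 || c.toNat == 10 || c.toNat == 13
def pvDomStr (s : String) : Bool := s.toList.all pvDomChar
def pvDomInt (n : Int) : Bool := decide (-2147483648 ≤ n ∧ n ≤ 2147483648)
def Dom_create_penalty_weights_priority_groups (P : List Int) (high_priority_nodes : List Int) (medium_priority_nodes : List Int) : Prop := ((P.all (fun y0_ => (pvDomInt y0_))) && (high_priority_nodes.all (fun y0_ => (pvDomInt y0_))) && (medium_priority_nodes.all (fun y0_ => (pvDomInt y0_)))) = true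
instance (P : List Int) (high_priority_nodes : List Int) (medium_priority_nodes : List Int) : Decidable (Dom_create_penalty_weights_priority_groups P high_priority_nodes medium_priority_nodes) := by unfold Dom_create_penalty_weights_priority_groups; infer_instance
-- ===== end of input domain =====

-- B replaces A's per-node scan of both priority lists by one default-weight pass over P
-- followed by one overwrite pass per priority list guarded by set membership in P (objective: faster).

-- ===== PORT A =====
def create_penalty_weights_priority_groups (P : List Int) (high_priority_nodes : List Int) (medium_priority_nodes : List Int) : List (Int × Int) :=
  (P.foldl (fun d i =>
      if i ∈ high_priority_nodes then d.insert i 10000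
      else if i ∈ medium_priority_nodes then d.insert i 5000
      else d.insert i 1000)
    PySem.Dict.empty).items

-- ===== PORT B =====
def create_penalty_weights_priority_groups_alt (P : List Int) (high_priority_nodes : List Int) (medium_priority_nodes : List Int) : List (Int × Int) :=
  let pw0 := P.foldl (fun d i => d.insert i 1000) (PySem.Dict.empty : PySem.Dict Int Int)
  let pset := PySem.Set.ofList P
  let pw1 := medium_priority_nodes.foldl (fun d m => if m ∈ pset then d.insert m 5000 else d) pw0
  let pw2 := high_priority_nodes.foldl (fun d h => if h ∈ pset then d.insert h 10000 else d) pw1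
  pw2.items

-- ===== PRECONDITION & SPEC =====
def Spec_create_penalty_weights_priority_groups (P : List Int) (high_priority_nodes : List Int) (medium_priority_nodes : List Int) (out : List (Int × Int)) : Prop := out = create_penalty_weights_priority_groups_alt P high_priority_nodes medium_priority_nodes
instance (P : List Int) (high_priority_nodes : List Int) (medium_priority_nodes : List Int) (out : List (Int × Int)) : Decidable (Spec_create_penalty_weights_priority_groups P high_priority_nodes medium_priority_nodes out) := by unfold Spec_create_penalty_weights_priority_groups; infer_instance

-- ===== CLAIM (what is proved, stated in full; the proofs are below) =====
def Claim_equal_create_penalty_weights_priority_groups : Prop := ∀ (P : List Int) (high_priority_nodes : List Int) (medium_priority_nodes : List Int), Dom_create_penalty_weights_priority_groups P high_priority_nodes medium_priority_nodes → Spec_create_penalty_weights_priority_groups P high_priority_nodes medium_priority_nodes (create_penalty_weights_priority_groups P high_priority_nodes medium_priority_nodes)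

-- ===== LEMMAS AND PROOFS =====

-- Inserting at a key already present in a key/value-function dict updates that key in place.
theorem pv_insert_mk_map (ks : List Int) (g : Int → Int) (m v : Int) (hm : m ∈ ks) :
    (PySem.Dict.mk (ks.map fun k => (k, g k))).insert m v
      = PySem.Dict.mk (ks.map fun k => (k, if k = m then v else g k)) := by
  apply PySem.Dict.ext
  have hc : (PySem.Dict.mk (ks.map fun k => (k, g k))).contains m = true := by
    rw [PySem.Dict.contains_eq_decide_mem_keys]
    simp [PySem.Dict.keys_mk, hm]
  rw [PySem.Dict.items_insert_of_contains _ _ hc]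
  show (ks.map fun k => (k, g k)).map _ = _
  rw [List.map_map]
  apply List.map_congr_left
  intro k _
  by_cases h : k = m <;> simp [h]

-- A loop inserting a key-determined value over P, started from a key/value-function dict.
theorem pv_foldl_insert_fn (P : List Int) (f : Int → Int) (ks : List Int) :
    P.foldl (fun d i => d.insert i (f i)) (PySem.Dict.mk (ks.map fun k => (k, f k)))
      = PySem.Dict.mk ((PySem.Set.update ks P).map fun k => (k, f k)) := by
  induction P generalizing ks with
  | nil => rfl
  | cons i rest ih =>
    simp only [List.foldl_cons, PySem.Set.update, PySem.Set.add]
    by_cases h : i ∈ ks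
    · have hstay : (PySem.Dict.mk (ks.map fun k => (k, f k))).insert i (f i)
          = PySem.Dict.mk (ks.map fun k => (k, f k)) := by
        rw [pv_insert_mk_map ks f i (f i) h]
        congr 1
        apply List.map_congr_left
        intro k _
        by_cases hk : k = i <;> simp [hk]
      rw [hstay]
      have hcont : PySem.Set.contains ks i = true := by
        simpa [PySem.Set.contains] using h
      rw [if_pos hcont]
      exact ih ks
    · have hc : (PySem.Dict.mk (ks.map fun k => (k, f k))).contains i = false := by
        rw [PySem.Dict.contains_eq_decide_mem_keys]
        simp [PySem.Dict.keys_mk, h]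
      have hnew : (PySem.Dict.mk (ks.map fun k => (k, f k))).insert i (f i)
          = PySem.Dict.mk ((ks ++ [i]).map fun k => (k, f k)) := by
        apply PySem.Dict.ext
        rw [PySem.Dict.items_insert_of_not_contains _ _ hc]
        simp
      have hcont : ¬ PySem.Set.contains ks i = true := by
        simpa [PySem.Set.contains] using h
      rw [hnew, if_neg hcont]
      exact ih (ks ++ [i])

theorem pv_foldl_insert_fn_empty (P : List Int) (f : Int → Int) :
    P.foldl (fun d i => d.insert i (f i)) (PySem.Dict.empty : PySem.Dict Int Int)
      = PySem.Dict.mk ((PySem.Set.ofList P).map fun k => (k, f k)) := by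
  simpa using pv_foldl_insert_fn P f []

-- A guarded overwrite pass over L sets every key of L ∩ P to v, leaving the key order of the dict unchanged.
theorem pv_overwrite_pass (L P : List Int) (v : Int) (g : Int → Int) :
    L.foldl (fun d m => if m ∈ PySem.Set.ofList P then d.insert m v else d)
        (PySem.Dict.mk ((PySem.Set.ofList P).map fun k => (k, g k)))
      = PySem.Dict.mk ((PySem.Set.ofList P).map fun k => (k, if k ∈ L then v else g k)) := by
  induction L generalizing g with
  | nil => simp
  | cons m L ih =>
    simp only [List.foldl_cons]
    by_cases h : m ∈ PySem.Set.ofList P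
    · rw [if_pos h, pv_insert_mk_map _ _ _ _ h, ih]
      congr 1
      apply List.map_congr_left
      intro k _
      by_cases h1 : k ∈ L <;> by_cases h2 : k = m <;> simp [h1, h2]
    · rw [if_neg h, ih]
      congr 1
      apply List.map_congr_left
      intro k hk
      have hne : k ≠ m := fun e => h (e ▸ hk)
      simp [hne]

-- ===== VERDICT (by name: the statement is the Claim_ definition above) =====
theorem create_penalty_weights_priority_groups_spec : Claim_equal_create_penalty_weights_priority_groups := by
  intro P high medium _
  unfold Spec_create_penalty_weights_priority_groups
  unfold create_penalty_weights_priority_groups create_penalty_weights_priority_groups_alt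
  have hA : (fun (d : PySem.Dict Int Int) i =>
        if i ∈ high then d.insert i 10000
        else if i ∈ medium then d.insert i 5000
        else d.insert i 1000)
      = fun d i => d.insert i (if i ∈ high then 10000 else if i ∈ medium then 5000 else 1000) := by
    funext d i
    by_cases h1 : i ∈ high <;> by_cases h2 : i ∈ medium <;> simp [h1, h2]
  rw [hA]
  dsimp only
  rw [pv_foldl_insert_fn_empty P (fun i => if i ∈ high then 10000 else if i ∈ medium then 5000 else 1000)]
  rw [pv_foldl_insert_fn_empty P (fun _ => (1000 : Int)), pv_overwrite_pass, pv_overwrite_pass]
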